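-- pv_equiv track=rewrite | github.com/piegeek/AlgorithmsPractice | Practice/algospot/boardcover2.py | get_board_state
-- ===== SOURCE A (Python) =====
-- def get_board_state(board):
-- 	state = 0
--
-- 	count = 0
--
-- 	for i in range(len(board)):
-- 		for j in range(len(board[i])):
-- 			if board[i][j] == 1:
-- 				state |= (1 << count)
--
-- 			count += 1
--
-- 	return state
-- ===== SOURCE B (Python) =====
-- def get_board_state(board):
--     bits = ''.join('1' if cell == 1 else '0' for row in board for cell in row)
--     return int('0' + bits[::-1], 2)
-- ===== Notes on version B (the rewrite author's own statement) =====
-- stated objective: idiomatic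
-- what changed: Replaces the mutable bit-OR accumulator with a counter by flattening the board into a '1'/'0' string and doing one base-2 parse of its reversal.
import Mathlib
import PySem

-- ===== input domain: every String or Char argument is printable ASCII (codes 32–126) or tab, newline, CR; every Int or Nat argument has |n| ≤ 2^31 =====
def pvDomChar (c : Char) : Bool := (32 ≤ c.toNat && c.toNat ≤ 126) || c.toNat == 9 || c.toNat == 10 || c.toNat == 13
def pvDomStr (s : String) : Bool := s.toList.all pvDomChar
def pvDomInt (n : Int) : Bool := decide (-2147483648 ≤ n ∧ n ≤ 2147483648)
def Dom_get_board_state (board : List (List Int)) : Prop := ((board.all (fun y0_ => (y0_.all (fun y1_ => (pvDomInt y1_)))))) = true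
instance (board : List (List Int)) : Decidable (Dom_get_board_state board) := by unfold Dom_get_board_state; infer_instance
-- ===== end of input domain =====

-- B replaces A's bit-OR accumulation loop by building a '1'/'0' string row-major and parsing its reversal in base 2 (idiomatic restructuring, same cost).


-- ===== PORT A =====
-- state and count are Python non-negative ints here, kept as Nat; the final state is returned as Int.
def get_board_state (board : List (List Int)) : Int :=
  let r : Nat × Nat := board.foldl (fun (p : Nat × Nat) (row : List Int) =>
    row.foldl (fun (q : Nat × Nat) (cell : Int) =>
      ((if cell = 1 then q.1 ||| (1 <<< q.2) else q.1), q.2 + 1)) p) (0, 0)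
  (r.1 : Int)

-- ===== PORT B =====
-- bits: the generator-join as a char list; int('0'+bits[::-1], 2) ported by hand as the
-- standard left-to-right base-2 accumulation (exact for '0'/'1' strings).
def get_board_state_alt (board : List (List Int)) : Int :=
  let bits : List Char := board.flatMap (fun row => row.map (fun cell => if cell = 1 then '1' else '0'))
  ('0' :: bits.reverse).foldl (fun acc ch => acc * 2 + (if ch = '1' then 1 else 0)) (0 : Int)

-- ===== PRECONDITION & SPEC =====
def Spec_get_board_state (board : List (List Int)) (out : Int) : Prop := out = get_board_state_alt board
instance (board : List (List Int)) (out : Int) : Decidable (Spec_get_board_state board out) := by unfold Spec_get_board_state; infer_instance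

-- ===== CLAIM (what is proved, stated in full; the proofs are below) =====
def Claim_equal_get_board_state : Prop := ∀ (board : List (List Int)), Dom_get_board_state board → Spec_get_board_state board (get_board_state board)

-- ===== LEMMAS AND PROOFS =====

/-- The binary value of a flattened cell list, first cell least significant. -/
def pvVal (l : List Int) : Nat := l.foldr (fun x acc => (if x = 1 then 1 else 0) + 2 * acc) 0

theorem pvA_fold (cells : List Int) (s c : Nat) (h : s < 2 ^ c) :
    cells.foldl (fun (q : Nat × Nat) (cell : Int) =>
      ((if cell = 1 then q.1 ||| (1 <<< q.2) else q.1), q.2 + 1)) (s, c)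
    = (s + 2 ^ c * pvVal cells, c + cells.length) := by
  induction cells generalizing s c with
  | nil => simp [pvVal]
  | cons x xs ih =>
    simp only [List.foldl_cons, pvVal, List.foldr] at *
    by_cases hx : x = 1
    · have h2 : 2 ^ c + s = 2 ^ c ||| s := by
        have h3 := Nat.two_pow_add_eq_or_of_lt h 1
        simpa using h3
      have hor : s ||| 1 <<< c = s + 2 ^ c := by
        rw [Nat.one_shiftLeft, Nat.or_comm, ← h2, Nat.add_comm]
      rw [if_pos hx, hor, ih (s + 2 ^ c) (c + 1) (by rw [pow_succ]; omega)]
      simp only [hx, if_true, Prod.mk.injEq, List.length_cons, pow_succ]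
      constructor
      · ring
      · omega
    · rw [if_neg hx, ih s (c + 1) (by rw [pow_succ]; omega)]
      simp only [hx, ite_false, Prod.mk.injEq, List.length_cons, pow_succ]
      constructor
      · ring
      · omega

theorem pvA_eq (board : List (List Int)) :
    get_board_state board = (pvVal board.flatten : Int) := by
  unfold get_board_state
  rw [List.foldl_flatten.symm, pvA_fold board.flatten 0 0 (by simp)]
  simp

theorem pvB_fold (l : List Int) (a : Int) :
    ((l.map (fun cell => if cell = 1 then '1' else '0')).reverse).foldl
      (fun acc ch => acc * 2 + (if ch = '1' then 1 else 0)) a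
    = a * 2 ^ l.length + (pvVal l : Int) := by
  induction l generalizing a with
  | nil => simp [pvVal]
  | cons x xs ih =>
    simp only [List.map, List.reverse_cons, List.foldl_append, List.foldl, pvVal] at *
    rw [ih]
    by_cases hx : x = 1 <;> simp [hx, pow_succ] <;> ring

theorem pvB_eq (board : List (List Int)) :
    get_board_state_alt board = (pvVal board.flatten : Int) := by
  unfold get_board_state_alt
  simp only [List.flatMap_def, ← List.map_flatten]
  rw [List.foldl_cons, pvB_fold]
  norm_num
  decide

-- ===== VERDICT (by name: the statement is the Claim_ definition above) =====
theorem get_board_state_spec : Claim_equal_get_board_state := by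
  intro board _
  unfold Spec_get_board_state
  rw [pvA_eq, pvB_eq]
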